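-- pv_equiv track=rewrite | github.com/ricosjp/monolish | test/logger/logging/logger.py | drop_dir_info
-- ===== SOURCE A (Python) =====
-- def drop_dir_info(target_dict_list):
--     min_layer = min(map(lambda any_dict:any_dict["name"].count("/"), target_dict_list))
--     min_dict_list = list(filter(lambda any_dict:any_dict["name"].count("/") == min_layer, target_dict_list))
--     min_dict = min_dict_list[0]
--     min_dir = min_dict["name"]
--     drop_list = min_dir.split("/")
--     drop_dir_text = ",".join(drop_list[:-2])
--     drop_dir_text = drop_dir_text.replace(",", "/")
--     drop_dir_text = drop_dir_text + "/"
--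
--     temp_dict_list = []
--     for any_dict in target_dict_list:
--         any_dict["name"] = any_dict["name"].replace(drop_dir_text, "")
--         temp_dict_list.append(any_dict)
--     target_dict_list = temp_dict_list
--     return target_dict_list
-- ===== SOURCE B (Python) =====
-- def drop_dir_info(target_dict_list):
--     # first entry with the fewest '/' in its name (stable sort keeps A's tie-breaking)
--     name = sorted(target_dict_list, key=lambda d: d["name"].count("/"))[0]["name"]
--     # one character scan, no split/join: done = text up to and including the
--     # second-to-last '/' seen so far, mid = the segment between the last two
--     # slashes (with its '/'), cur = text since the last '/'
--     done = mid = cur = ""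
--     for ch in name:
--         if ch == "/":
--             done += mid
--             mid = cur + "/"
--             cur = ""
--         else:
--             cur += ch
--     prefix = done or "/"
--     return [dict(d, name=d["name"].replace(prefix, "")) for d in target_dict_list]
-- ===== Notes on version B (the rewrite author's own statement) =====
-- stated objective: alternative
-- what changed: Selection is a stable sort by slash count followed by taking the head (instead of A's min-over-mapped-counts plus filter plus [0]), the dropped prefix is built by a single character scan with three running buffers (done/mid/cur) instead of A's split/','.join/replace-comma pipeline, and the result is a fresh list of fresh dicts from a comprehension instead of A's in-place mutation loop; the return value is identical but B does not mutate the input dicts.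
-- intended difference: On inputs whose first minimum-depth name contains a ',' before its second-to-last '/', A turns those commas into '/' while building the prefix to drop (so it typically strips nothing), while B drops the real common directory prefix, which is the intended behaviour. — e.g. on drop_dir_info([[("name", "a,b/c/d")]]): A returns [[("name", "a,b/c/d")]], B returns [[("name", "c/d")]]
import Mathlib
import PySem

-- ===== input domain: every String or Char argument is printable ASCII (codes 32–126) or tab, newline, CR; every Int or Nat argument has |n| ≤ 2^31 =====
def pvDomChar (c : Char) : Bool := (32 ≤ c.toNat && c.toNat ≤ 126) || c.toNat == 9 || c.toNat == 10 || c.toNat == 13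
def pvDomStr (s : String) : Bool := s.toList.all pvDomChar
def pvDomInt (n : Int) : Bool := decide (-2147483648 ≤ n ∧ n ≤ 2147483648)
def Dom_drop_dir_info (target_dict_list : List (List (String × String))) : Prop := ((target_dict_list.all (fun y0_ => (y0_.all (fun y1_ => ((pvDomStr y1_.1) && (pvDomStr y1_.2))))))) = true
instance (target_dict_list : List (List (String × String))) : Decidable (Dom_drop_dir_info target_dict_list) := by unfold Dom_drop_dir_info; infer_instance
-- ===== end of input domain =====

-- B selects the reference entry by a stable sort on slash count followed by head (instead of A's
-- min-over-counts + filter + [0]), builds the dropped prefix with ONE character scan over that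
-- name using three running buffers (instead of A's split / ','.join / replace-comma pipeline),
-- and returns a fresh list of fresh dicts; A mutates its dicts in place, so the equivalence
-- proved here is about the RETURN value only.

-- shared helpers: any_dict["name"] (KeyError inputs are excluded by Pre_) and its "/"-count
def pvNameOf (d : List (String × String)) : String := PySem.Dict.getD (PySem.Dict.mk d) "name" ""
def pvSlashes (d : List (String × String)) : Nat := PySem.Str.count (pvNameOf d) "/"

-- ===== PORT A =====
def drop_dir_info (target_dict_list : List (List (String × String))) : List (List (String × String)) :=
  let min_layer : Nat := (PySem.List.min? (target_dict_list.map (fun any_dict => pvSlashes any_dict)) (fun x => x)).getD 0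
  let min_dict_list := target_dict_list.filter (fun any_dict => pvSlashes any_dict == min_layer)
  let min_dict := min_dict_list.headD []
  let min_dir := pvNameOf min_dict
  let drop_list := (PySem.Str.split? min_dir "/").getD []
  let t1 := PySem.Str.join "," (PySem.List.slice drop_list none (some (-2)))
  let t2 := PySem.Str.replace t1 "," "/"
  let drop_dir_text := PySem.Str.join "" [t2, "/"]
  target_dict_list.foldl
    (fun acc any_dict =>
      acc ++ [(PySem.Dict.insert (PySem.Dict.mk any_dict) "name"
                (PySem.Str.replace (pvNameOf any_dict) drop_dir_text "")).items]) []

-- ===== PORT B =====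
-- the body of Source B's for-loop over the characters of the chosen name
def pvStep (st : List Char × List Char × List Char) (ch : Char) : List Char × List Char × List Char :=
  if ch = '/' then (st.1 ++ st.2.1, st.2.2 ++ ['/'], [])
  else (st.1, st.2.1, st.2.2 ++ [ch])

def drop_dir_info_alt (target_dict_list : List (List (String × String))) : List (List (String × String)) :=
  let name := pvNameOf ((PySem.List.sorted target_dict_list (fun d => pvSlashes d) false).headD [])
  let st := name.toList.foldl pvStep ([], [], [])
  let pre := String.ofList (if st.1 = [] then ['/'] else st.1)
  target_dict_list.map
    (fun d =>
      (PySem.Dict.insert (PySem.Dict.mk d) "name"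
        (PySem.Str.replace (pvNameOf d) pre "")).items)

-- ===== PRECONDITION & SPEC =====
-- Pre_ excludes exactly the inputs where A raises: the empty list (ValueError from min) and
-- lists containing a dict without a "name" key (KeyError).
def Pre_drop_dir_info (target_dict_list : List (List (String × String))) : Prop :=
  target_dict_list ≠ [] ∧ ∀ d ∈ target_dict_list, (PySem.Dict.contains (PySem.Dict.mk d) "name") = true
instance (target_dict_list : List (List (String × String))) : Decidable (Pre_drop_dir_info target_dict_list) := by unfold Pre_drop_dir_info; infer_instance
def pvWitness_drop_dir_info : (List (List (String × String))) := [[("name", "a/b/c")]]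

-- D_ helper, stated on the raw input only: the first-match "name" value of an association list
def pvKey (d : List (String × String)) : List Char := ((d.lookup "name").getD "").toList

-- On inputs whose first minimum-depth "name" contains a ',' before its second-to-last '/'
-- (i.e. at least two '/' follow its first ','), A garbles the dropped prefix by turning those
-- commas into '/' (so it typically strips nothing), while B strips the real common prefix,
-- which is the intended behaviour.
def D_drop_dir_info (target_dict_list : List (List (String × String))) : Prop :=
  2 ≤ (((pvKey ((target_dict_list.argmin fun d => (pvKey d).count '/').getD [])).dropWhile (· != ',')).count '/')
instance (target_dict_list : List (List (String × String))) : Decidable (D_drop_dir_info target_dict_list) := by unfold D_drop_dir_info; infer_instance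

def Spec_drop_dir_info (target_dict_list : List (List (String × String))) (out : List (List (String × String))) : Prop := ¬ D_drop_dir_info target_dict_list → out = drop_dir_info_alt target_dict_list
instance (target_dict_list : List (List (String × String))) (out : List (List (String × String))) : Decidable (Spec_drop_dir_info target_dict_list out) := by unfold Spec_drop_dir_info; infer_instance

def pvDiffWitness_drop_dir_info : (List (List (String × String))) := [[("name", "a,b/c/d")]]
def pvDiffWitnessOut_drop_dir_info : (List (List (String × String))) × (List (List (String × String))) :=
  ([[("name", "a,b/c/d")]], [[("name", "c/d")]])

-- ===== CLAIM (what is proved, stated in full; the proofs are below) =====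
def Claim_unchanged_drop_dir_info : Prop := ∀ (target_dict_list : List (List (String × String))), Dom_drop_dir_info target_dict_list → Pre_drop_dir_info target_dict_list → Spec_drop_dir_info target_dict_list (drop_dir_info target_dict_list)
def Claim_changed_drop_dir_info : Prop := Dom_drop_dir_info (pvDiffWitness_drop_dir_info) ∧ Pre_drop_dir_info (pvDiffWitness_drop_dir_info) ∧ D_drop_dir_info (pvDiffWitness_drop_dir_info) ∧ drop_dir_info (pvDiffWitness_drop_dir_info) = pvDiffWitnessOut_drop_dir_info.1 ∧ drop_dir_info_alt (pvDiffWitness_drop_dir_info) = pvDiffWitnessOut_drop_dir_info.2 ∧ pvDiffWitnessOut_drop_dir_info.1 ≠ pvDiffWitnessOut_drop_dir_info.2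

def Claim_exact_drop_dir_info : Prop := ∀ (target_dict_list : List (List (String × String))), Dom_drop_dir_info target_dict_list → Pre_drop_dir_info target_dict_list → D_drop_dir_info target_dict_list → drop_dir_info target_dict_list ≠ drop_dir_info_alt target_dict_list

-- ===== LEMMAS AND PROOFS =====

-- mapping a character function commutes with intercalate
theorem pv_map_intercalate (f : Char → Char) (sep : List Char) (parts : List (List Char)) :
    (sep.intercalate parts).map f = (sep.map f).intercalate (parts.map (List.map f)) := by
  induction parts with
  | nil => simp [List.intercalate]
  | cons p ps ih => cases ps <;> simp_all [List.intercalate]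

-- single-character replace is a character map
theorem pv_replace_go (s : List Char) : ∀ (fuel : Nat) (acc : List Char), s.length ≤ fuel →
    PySem.Chars.replace.go [','] ['/'] fuel s acc
      = acc.reverse ++ s.map (fun c => if c = ',' then '/' else c) := by
  induction s with
  | nil => intro fuel acc _; cases fuel <;> simp [PySem.Chars.replace.go]
  | cons c t ih =>
    intro fuel acc h
    cases fuel with
    | zero => simp at h
    | succ n =>
      have hstep : PySem.Chars.replace.go [','] ['/'] (n+1) (c::t) acc
          = if c = ',' then PySem.Chars.replace.go [','] ['/'] n t ('/'::acc)
            else PySem.Chars.replace.go [','] ['/'] n t (c::acc) := by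
        by_cases hc : c = ','
        · subst hc; simp [PySem.Chars.replace.go, List.isPrefixOf]
        · simp [PySem.Chars.replace.go, List.isPrefixOf, hc,
            (by simpa [eq_comm] using hc : ¬ (',' = c))]
      have hn : t.length ≤ n := by simpa using h
      by_cases hc : c = ','
      · subst hc; rw [hstep, if_pos rfl, ih n _ hn]; simp
      · rw [hstep, if_neg hc, ih n _ hn]; simp [hc]

-- the ','-join-then-replace trick equals a '/'-join when no segment contains a comma
theorem pv_prefix_eq (segs : List String) (h : ∀ seg ∈ segs, ',' ∉ seg.toList) :
    PySem.Str.replace (PySem.Str.join "," segs) "," "/" = PySem.Str.join "/" segs := by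
  have hmap : ∀ s ∈ List.map String.toList segs,
      List.map (fun c => if c = ',' then '/' else c) s = id s := by
    intro s hs
    obtain ⟨s0, hs0, rfl⟩ := List.mem_map.mp hs
    rw [List.map_congr_left (fun c hc => if_neg (fun he => h s0 hs0 (by rw [← he]; exact hc)))]
    exact List.map_id _
  have h2 : List.map (List.map (fun c => if c = ',' then '/' else c)) (List.map String.toList segs)
      = List.map String.toList segs := by
    rw [List.map_congr_left hmap, List.map_id]
  unfold PySem.Str.replace PySem.Str.join PySem.Chars.join PySem.Chars.replace
  simp only [String.toList_ofList]
  rw [if_neg (by simp)]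
  rw [(by rfl : (",").toList = [',']), (by rfl : ("/").toList = ['/'])]
  rw [pv_replace_go _ _ _ le_rfl, pv_map_intercalate, h2]
  simp

-- single-character substring count is the character count
theorem pv_count_go (s : List Char) : ∀ (fuel acc : Nat), s.length ≤ fuel →
    PySem.Chars.count.go ['/'] fuel s acc = acc + s.count '/' := by
  induction s with
  | nil => intro fuel acc _; cases fuel <;> simp [PySem.Chars.count.go]
  | cons c t ih =>
    intro fuel acc h
    cases fuel with
    | zero => simp at h
    | succ n =>
      have hn : t.length ≤ n := by simpa using h
      by_cases hc : c = '/'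
      · subst hc
        have : PySem.Chars.count.go ['/'] (n+1) ('/'::t) acc
            = PySem.Chars.count.go ['/'] n t (acc + 1) := by
          simp [PySem.Chars.count.go, List.isPrefixOf]
        rw [this, ih n _ hn]
        simp [List.count_cons]; omega
      · have : PySem.Chars.count.go ['/'] (n+1) (c::t) acc
            = PySem.Chars.count.go ['/'] n t acc := by
          simp [PySem.Chars.count.go, List.isPrefixOf, hc,
            (by simpa [eq_comm] using hc : ¬ ('/' = c))]
        rw [this, ih n _ hn]
        simp [List.count_cons, hc]

theorem pv_count_eq (s : String) : PySem.Str.count s "/" = s.toList.count '/' := by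
  have : ("/").toList = ['/'] := rfl
  rw [PySem.Str.count, PySem.Chars.count, this]
  rw [if_neg (by simp)]
  simpa using pv_count_go s.toList s.toList.length 0 le_rfl

-- the two "name" lookups agree
theorem pv_key_eq (d : List (String × String)) : pvKey d = (pvNameOf d).toList := by
  have h : d.lookup "name" = Option.map (fun x => x.2) (d.find? (fun p => p.1 == "name")) := by
    induction d with
    | nil => rfl
    | cons p t ih =>
      obtain ⟨a, b⟩ := p
      by_cases h : a = "name"
      · subst h; simp [List.lookup, List.find?]
      · have h1 : ("name" == a) = false := beq_eq_false_iff_ne.mpr (fun he => h he.symm)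
        have h2 : (a == "name") = false := beq_eq_false_iff_ne.mpr h
        simp [List.lookup, List.find?, h1, h2, ih]
  rw [pvKey, pvNameOf, PySem.Dict.getD, PySem.Dict.get?, h]

-- pvSlashes in terms of the D_ helpers
theorem pv_slashes_eq (d : List (String × String)) : pvSlashes d = (pvKey d).count '/' := by
  rw [pvSlashes, pv_key_eq, pv_count_eq]

-- reference splitter used only in the proofs: split on '/' with an explicit current-chunk accumulator
def pvSplit : List Char → List Char → List (List Char)
  | [], cur => [cur.reverse]
  | c :: t, cur => if c = '/' then cur.reverse :: pvSplit t [] else pvSplit t (c :: cur)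

theorem pv_split_go (s : List Char) : ∀ (fuel : Nat) (cur : List Char) (acc : List (List Char)),
    s.length ≤ fuel →
    PySem.Chars.splitOn.go ['/'] fuel s cur acc = acc.reverse ++ pvSplit s cur := by
  induction s with
  | nil => intro fuel cur acc _; cases fuel <;> simp [PySem.Chars.splitOn.go, pvSplit]
  | cons c t ih =>
    intro fuel cur acc h
    cases fuel with
    | zero => simp at h
    | succ n =>
      have hn : t.length ≤ n := by simpa using h
      by_cases hc : c = '/'
      · subst hc
        have : PySem.Chars.splitOn.go ['/'] (n+1) ('/'::t) cur acc
            = PySem.Chars.splitOn.go ['/'] n t [] (cur.reverse :: acc) := by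
          simp [PySem.Chars.splitOn.go, List.isPrefixOf]
        rw [this, ih n _ _ hn]
        simp [pvSplit]
      · have : PySem.Chars.splitOn.go ['/'] (n+1) (c::t) cur acc
            = PySem.Chars.splitOn.go ['/'] n t (c::cur) acc := by
          simp [PySem.Chars.splitOn.go, List.isPrefixOf, hc,
            (by simpa [eq_comm] using hc : ¬ ('/' = c))]
        rw [this, ih n _ _ hn]
        simp [pvSplit, hc]

theorem pv_splitOn_eq (s : List Char) : PySem.Chars.splitOn s ['/'] = pvSplit s [] := by
  rw [PySem.Chars.splitOn]
  simpa using pv_split_go s (s.length + 1) [] [] (by omega)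

theorem pv_split_length (s : List Char) : ∀ cur, (pvSplit s cur).length = s.count '/' + 1 := by
  induction s with
  | nil => intro cur; simp [pvSplit]
  | cons c t ih =>
    intro cur
    by_cases hc : c = '/'
    · subst hc; simp [pvSplit, ih, List.count_cons]
    · simp [pvSplit, hc, ih, List.count_cons]

-- a decomposition witnessing a comma followed by at least two slashes
def pvDeepL (l : List Char) : Prop := ∃ u v, l = u ++ ',' :: v ∧ 2 ≤ v.count '/'

theorem pv_deep_go (s : List Char) : ∀ (cur : List Char) (seg : List Char),
    seg ∈ (pvSplit s cur).take ((pvSplit s cur).length - 2) → ',' ∈ seg →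
    (',' ∈ cur ∧ 2 ≤ s.count '/') ∨ pvDeepL s := by
  induction s with
  | nil => intro cur seg hs _; simp [pvSplit] at hs
  | cons c t ih =>
    intro cur seg hs hcomma
    by_cases hc : c = '/'
    · subst hc
      simp only [pvSplit, if_true] at hs
      have hlen : (cur.reverse :: pvSplit t []).length - 2 = (pvSplit t []).length - 1 := by
        simp
      rw [hlen] at hs
      cases hk : (pvSplit t []).length - 1 with
      | zero => rw [hk] at hs; simp at hs
      | succ k =>
        rw [hk, List.take_succ_cons] at hs
        rcases List.mem_cons.mp hs with he | hmem
        · subst he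
          left
          constructor
          · simpa using hcomma
          · have h1 : (pvSplit t []).length = t.count '/' + 1 := pv_split_length t []
            have h2 : List.count '/' ('/' :: t) = t.count '/' + 1 := by
              simp [List.count_cons]
            omega
        · have hmem' : seg ∈ (pvSplit t []).take ((pvSplit t []).length - 2) := by
            have hk2 : (pvSplit t []).length - 2 = k := by omega
            rw [hk2]; exact hmem
          rcases ih [] seg hmem' hcomma with ⟨hfalse, _⟩ | ⟨u, v, hv, hcnt⟩
          · simp at hfalse
          · right; exact ⟨'/' :: u, v, by simp [hv], hcnt⟩
    · simp only [pvSplit, if_neg hc] at hs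
      rcases ih (c :: cur) seg hs hcomma with ⟨hcur, hcnt⟩ | ⟨u, v, hv, hcnt⟩
      · rcases List.mem_cons.mp hcur with he | hcur'
        · right; exact ⟨[], t, by simp [← he], by simpa [List.count_cons, hc] using hcnt⟩
        · left; exact ⟨hcur', by simpa [List.count_cons, hc] using hcnt⟩
      · right; exact ⟨c :: u, v, by simp [hv], hcnt⟩

-- proof-side abbreviation: at least two '/' follow the first ','
def pvDeep (s : List Char) : Prop := 2 ≤ ((s.dropWhile (· != ',')).count '/')

-- Mathlib's argmin is the same first-strict-minimum fold as Python's min(key=...)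
theorem pv_argmin_eq {α : Type} (key : α → Nat) (l : List α) :
    l.argmin key = PySem.List.min? l key := by
  have h : ∀ (acc : Option α),
      l.foldl (List.argAux fun b c => key b < key c) acc
        = l.foldl (fun acc x => match acc with
            | none => some x
            | some m => if key x < key m then some x else some m) acc := by
    induction l with
    | nil => intro acc; rfl
    | cons x t ih =>
      intro acc
      rw [List.foldl_cons, List.foldl_cons, ih]
      congr 1
      cases acc with
      | none => rfl
      | some m => rfl
  exact h none

theorem pv_deepL_deep (s : List Char) (h : pvDeepL s) : pvDeep s := by
  obtain ⟨u, v, hv, hc⟩ := h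
  subst hv
  unfold pvDeep
  induction u with
  | nil => simpa [List.dropWhile] using hc
  | cons c u' ih =>
    by_cases hcc : c = ','
    · subst hcc
      rw [List.cons_append, List.dropWhile_cons]
      simp only [bne_self_eq_false, Bool.false_eq_true, if_false]
      calc 2 ≤ v.count '/' := hc
        _ ≤ (u' ++ ',' :: v).count '/' := by simp [List.count_append]
        _ ≤ (',' :: (u' ++ ',' :: v)).count '/' := by simp [List.count_cons]
    · rw [List.cons_append, List.dropWhile_cons]
      simp only [bne_iff_ne, ne_eq, hcc, not_false_eq_true, if_true]
      exact ih

-- Python's xs[:-2]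
theorem pv_slice_neg2 {α : Type} (xs : List α) :
    PySem.List.slice xs none (some (-2)) = xs.take (xs.length - 2) := by
  simp only [PySem.List.slice, PySem.List.clampIdx]
  congr 1
  split_ifs <;> omega

-- Python's min with a key: the running strict-< fold returns the first key-minimal element;
-- its key is the min-fold of the keys, and it heads the filter by that key value
theorem pv_sel_go {α : Type} (key : α → Nat) :
    ∀ (t : List α) (m : α), ∃ m',
      t.foldl (fun acc x => match acc with
        | none => some x
        | some mm => if key x < key mm then some x else some mm) (some m) = some m'
      ∧ key m' = (t.map key).foldl min (key m)
      ∧ ((m :: t).filter (fun d => key d == key m')).head? = some m' := by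
  intro t
  induction t with
  | nil => intro m; exact ⟨m, rfl, rfl, by simp⟩
  | cons x t ih =>
    intro m
    by_cases h : key x < key m
    · obtain ⟨m', h1, h2, h3⟩ := ih x
      have hle : key m' ≤ key x := by
        rw [h2]; exact (PySem.List.foldl_min_le (t.map key) (key x)).1
      refine ⟨m', by simpa [h] using h1, ?_, ?_⟩
      · rw [List.map_cons, List.foldl_cons, Nat.min_eq_right h.le, h2]
      · have hne : ¬ (key m == key m') = true := by
          simp only [beq_iff_eq]; omega
        simpa [List.filter, hne] using h3
    · obtain ⟨m', h1, h2, h3⟩ := ih m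
      have hmx : key m ≤ key x := Nat.le_of_not_lt h
      have hle : key m' ≤ key m := by
        rw [h2]; exact (PySem.List.foldl_min_le (t.map key) (key m)).1
      refine ⟨m', by simpa [h] using h1, ?_, ?_⟩
      · rw [List.map_cons, List.foldl_cons, Nat.min_eq_left hmx, h2]
      · by_cases hm : key m = key m'
        · have hmm' : m = m' := by
            have hh : ((m :: t).filter (fun d => key d == key m')).head? = some m := by
              simp [List.filter, hm]
            rw [hh] at h3; exact Option.some_injective _ h3
          subst hmm'
          simp [List.filter, hm]
        · have hlt : key m' < key m := lt_of_le_of_ne hle (fun he => hm he.symm)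
          have hxne : ¬ (key x == key m') = true := by
            simp only [beq_iff_eq]; omega
          have hmne : ¬ (key m == key m') = true := by
            simp only [beq_iff_eq]; exact fun he => hm he
          rw [List.filter_cons_of_neg (by simpa using hmne), List.filter_cons_of_neg (by simpa using hxne)]
          rw [List.filter_cons_of_neg (by simpa using hmne)] at h3
          exact h3

-- head of the stable insertion sort = Python's min(xs, key): same first-strict-minimum recurrence
theorem pv_head_insertBy {α κ : Type} [LinearOrder κ] (key : α → κ) (x : α) (acc : List α) :
    (PySem.List.insertBy (fun a b => decide (key a < key b)) x acc).head?
      = some (match acc.head? with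
          | none => x
          | some m => if key x < key m then x else m) := by
  cases acc with
  | nil => simp [PySem.List.insertBy]
  | cons y ys =>
    by_cases h : key x < key y
    · simp [PySem.List.insertBy, h]
    · simp [PySem.List.insertBy, h]

theorem pv_head_sorted_aux {α κ : Type} [LinearOrder κ] (key : α → κ) (t : List α) :
    ∀ (acc : List α),
      (t.foldl (fun acc x => PySem.List.insertBy (fun a b => decide (key a < key b)) x acc) acc).head?
        = t.foldl (fun o x => match o with
            | none => some x
            | some m => if key x < key m then some x else some m) acc.head? := by
  induction t with
  | nil => intro acc; rfl
  | cons x t ih =>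
    intro acc
    rw [List.foldl_cons, List.foldl_cons, ih]
    congr 1
    rw [pv_head_insertBy]
    cases acc.head? with
    | none => rfl
    | some m => by_cases h : key x < key m <;> simp [h]

theorem pv_head_sorted {α κ : Type} [LinearOrder κ] (key : α → κ) (xs : List α) :
    (PySem.List.sorted xs key false).head? = PySem.List.min? xs key := by
  rw [PySem.List.sorted_eq_foldl_insertBy]
  simpa using pv_head_sorted_aux key xs []

-- the prefix scan of B: fold characterisation via the reference splitter
def pvFinish : List Char → List Char → List (List Char) → List Char × List Char × List Char
  | d, m, [] => (d, m, [])
  | d, m, [s] => (d, m, s)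
  | d, m, s :: s' :: cs => pvFinish (d ++ m) (s ++ ['/']) (s' :: cs)

theorem pv_split_nonempty (l cur : List Char) : pvSplit l cur ≠ [] := by
  have := pv_split_length l cur
  intro h0
  rw [h0] at this
  simp at this

theorem pv_fold_step (l : List Char) : ∀ (d m cu : List Char),
    l.foldl pvStep (d, m, cu) = pvFinish d m (pvSplit l cu.reverse) := by
  induction l with
  | nil => intro d m cu; simp [pvSplit, pvFinish]
  | cons c t ih =>
    intro d m cu
    by_cases hc : c = '/'
    · subst hc
      rw [List.foldl_cons, (by simp [pvStep] : pvStep (d, m, cu) '/' = (d ++ m, cu ++ ['/'], ([] : List Char)))]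
      rw [ih (d ++ m) (cu ++ ['/']) []]
      simp only [List.reverse_nil]
      rw [(by simp [pvSplit] : pvSplit ('/' :: t) cu.reverse = cu :: pvSplit t [])]
      obtain ⟨s', cs, hsc⟩ : ∃ s' cs, pvSplit t [] = s' :: cs := by
        cases h0 : pvSplit t [] with
        | nil => exact absurd h0 (pv_split_nonempty t [])
        | cons a b => exact ⟨a, b, rfl⟩
      rw [hsc, pvFinish]
    · rw [List.foldl_cons, (by simp [pvStep, hc] : pvStep (d, m, cu) c = (d, m, cu ++ [c]))]
      rw [ih d m (cu ++ [c])]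
      simp [pvSplit, hc]

theorem pv_finish_fst (cs : List (List Char)) : ∀ (d m : List Char), 2 ≤ cs.length →
    (pvFinish d m cs).1 = d ++ m ++ (cs.take (cs.length - 2)).flatMap (· ++ ['/']) := by
  induction cs with
  | nil => intro d m h; simp at h
  | cons s rest ih =>
    intro d m h
    cases rest with
    | nil => simp at h
    | cons s' cs' =>
      cases cs' with
      | nil => simp [pvFinish]
      | cons r rs =>
        rw [pvFinish, ih (d ++ m) (s ++ ['/']) (by simp)]
        have h1 : (s :: s' :: r :: rs).length - 2 = (s' :: r :: rs).length - 2 + 1 := by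
          simp
        rw [h1, List.take_succ_cons, List.flatMap_cons]
        simp

theorem pv_intercalate_cons (a : List Char) (rest : List (List Char)) (h : rest ≠ []) :
    List.intercalate ['/'] (a :: rest) = a ++ '/' :: List.intercalate ['/'] rest := by
  cases rest with
  | nil => exact absurd rfl h
  | cons b t => simp [List.intercalate]

-- slash-terminated concatenation of the chunks IS the '/'-join plus a trailing slash
theorem pv_flatMap_join (cs : List (List Char)) (h : cs ≠ []) :
    cs.flatMap (· ++ ['/']) = List.intercalate ['/'] cs ++ ['/'] := by
  induction cs with
  | nil => exact absurd rfl h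
  | cons s rest ih =>
    cases rest with
    | nil => simp [List.intercalate]
    | cons r rs =>
      rw [List.flatMap_cons, pv_intercalate_cons s (r :: rs) (by simp), ih (by simp)]
      simp

-- B's scanned prefix equals A's dropped prefix (slash-join of all but the last two chunks, plus '/')
theorem pv_B_prefix (s : List Char) :
    (if (s.foldl pvStep ([], [], [])).1 = [] then ['/'] else (s.foldl pvStep ([], [], [])).1)
      = List.intercalate ['/'] ((pvSplit s []).take ((pvSplit s []).length - 2)) ++ ['/'] := by
  rw [pv_fold_step s [] [] []]
  simp only [List.reverse_nil]
  obtain ⟨s1, rest, h1⟩ : ∃ s1 rest, pvSplit s [] = s1 :: rest := by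
    cases h0 : pvSplit s [] with
    | nil => exact absurd h0 (pv_split_nonempty s [])
    | cons a b => exact ⟨a, b, rfl⟩
  rw [h1]
  cases rest with
  | nil => simp [pvFinish, List.intercalate]
  | cons s2 rs =>
    rw [pv_finish_fst _ [] [] (by simp)]
    simp only [List.nil_append]
    cases htake : (s1 :: s2 :: rs).take ((s1 :: s2 :: rs).length - 2) with
    | nil => simp [htake, List.intercalate]
    | cons a b =>
      rw [pv_flatMap_join _ (by simp)]
      rw [if_neg (by simp)]

-- ===== VERDICT (by name: the statement is the Claim_ definition above) =====
theorem drop_dir_info_spec : Claim_unchanged_drop_dir_info := by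
  intro l hDom hPre
  unfold Spec_drop_dir_info
  intro hD
  obtain ⟨x, t, rfl⟩ := List.exists_cons_of_ne_nil hPre.1
  obtain ⟨m', h1, h2, h3⟩ := pv_sel_go (fun d => pvSlashes d) t x
  have hmin? : PySem.List.min? (x :: t) (fun d => pvSlashes d) = some m' := by
    simpa [PySem.List.min?] using h1
  have hlayer : (PySem.List.min? ((x :: t).map (fun d => pvSlashes d)) (fun y => y)).getD 0 = pvSlashes m' := by
    rw [List.map_cons, PySem.List.min?_id_cons]; simpa using h2.symm
  have hhead : ((x :: t).filter (fun d => pvSlashes d == pvSlashes m')).headD [] = m' := by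
    rw [List.headD_eq_head?_getD, h3]; rfl
  have hsortedHead : ((PySem.List.sorted (x :: t) (fun d => pvSlashes d) false).headD []) = m' := by
    rw [List.headD_eq_head?_getD, pv_head_sorted, hmin?]; rfl
  have hseg : ∀ seg ∈ PySem.List.slice ((PySem.Str.split? (pvNameOf m') "/").getD []) none (some (-2)),
      ',' ∉ seg.toList := by
    intro seg hs hc
    apply hD
    have hsplit : (PySem.Str.split? (pvNameOf m') "/").getD []
        = (pvSplit (pvNameOf m').toList []).map String.ofList := by
      rw [PySem.Str.split?, PySem.Chars.split?]
      rw [if_neg (by simp [(by rfl : ("/").toList = ['/'])])]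
      rw [(by rfl : ("/").toList = ['/']), pv_splitOn_eq]
      rfl
    rw [hsplit, pv_slice_neg2, List.length_map, ← List.map_take] at hs
    obtain ⟨chunk, hchunk, rfl⟩ := List.mem_map.mp hs
    rw [String.toList_ofList] at hc
    have hdeepL : pvDeepL (pvNameOf m').toList := by
      rcases pv_deep_go (pvNameOf m').toList [] chunk hchunk hc with ⟨hfalse, _⟩ | hok
      · simp at hfalse
      · exact hok
    have hdeep : pvDeep (pvNameOf m').toList := pv_deepL_deep _ hdeepL
    unfold D_drop_dir_info
    have hkeys : (fun d => (pvKey d).count '/') = fun d : List (String × String) => pvSlashes d :=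
      funext fun d => (pv_slashes_eq d).symm
    rw [pv_argmin_eq, hkeys, hmin?, Option.getD_some, pv_key_eq]
    exact hdeep
  -- both sides are the same map once the two prefix strings coincide
  simp only [drop_dir_info, drop_dir_info_alt]
  rw [hlayer, hhead, hsortedHead]
  rw [pv_prefix_eq _ hseg]
  rw [PySem.List.foldl_append_singleton_eq_map]
  have hsplit : (PySem.Str.split? (pvNameOf m') "/").getD []
      = (pvSplit (pvNameOf m').toList []).map String.ofList := by
    rw [PySem.Str.split?, PySem.Chars.split?]
    rw [if_neg (by simp [(by rfl : ("/").toList = ['/'])])]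
    rw [(by rfl : ("/").toList = ['/']), pv_splitOn_eq]
    rfl
  -- the two prefix strings are equal
  set sL := (pvNameOf m').toList with hsL
  set chunks := pvSplit sL [] with hch
  set dropC := chunks.take (chunks.length - 2) with hdC
  have hsegsS : PySem.List.slice ((PySem.Str.split? (pvNameOf m') "/").getD []) none (some (-2))
      = dropC.map String.ofList := by
    rw [hsplit, pv_slice_neg2, List.length_map, ← List.map_take]
  have hmtl : (dropC.map String.ofList).map String.toList = dropC := by
    rw [List.map_map]
    exact List.map_congr_left (fun a _ => String.toList_ofList) |>.trans (List.map_id _)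
  have hL : (PySem.Str.join "" [PySem.Str.join "/"
        (PySem.List.slice ((PySem.Str.split? (pvNameOf m') "/").getD []) none (some (-2))), "/"]).toList
      = List.intercalate ['/'] dropC ++ ['/'] := by
    rw [hsegsS]
    rw [PySem.Str.join, PySem.Str.join]
    simp only [String.toList_ofList, PySem.Chars.join]
    rw [(by rfl : ("/").toList = ['/'])]
    rw [hmtl]
    simp [List.intercalate]
  have hR := pv_B_prefix sL
  rw [← hch, ← hdC] at hR
  have hpref : PySem.Str.join "" [PySem.Str.join "/"
        (PySem.List.slice ((PySem.Str.split? (pvNameOf m') "/").getD []) none (some (-2))), "/"]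
      = String.ofList (if (sL.foldl pvStep ([], [], [])).1 = []
          then ['/'] else (sL.foldl pvStep ([], [], [])).1) := by
    calc PySem.Str.join "" [PySem.Str.join "/"
          (PySem.List.slice ((PySem.Str.split? (pvNameOf m') "/").getD []) none (some (-2))), "/"]
        = String.ofList ((PySem.Str.join "" [PySem.Str.join "/"
          (PySem.List.slice ((PySem.Str.split? (pvNameOf m') "/").getD []) none (some (-2))), "/"]).toList) := by
          rw [String.ofList_toList]
      _ = String.ofList (if (sL.foldl pvStep ([], [], [])).1 = []
            then ['/'] else (sL.foldl pvStep ([], [], [])).1) := by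
          rw [hL, hR]
  rw [hpref]
  simp

theorem drop_dir_info_changed : Claim_changed_drop_dir_info := by
  unfold Claim_changed_drop_dir_info; decide

-- generic one-step unfolding of the replace scanner
theorem pv_go_cons (old new : List Char) (fuel : Nat) (c : Char) (t acc : List Char) :
    PySem.Chars.replace.go old new (fuel+1) (c::t) acc
      = if old.isPrefixOf (c::t) then
          PySem.Chars.replace.go old new fuel (List.drop old.length (c::t)) (new.reverse ++ acc)
        else PySem.Chars.replace.go old new fuel t (c::acc) := by
  simp [PySem.Chars.replace.go]

-- deleting occurrences of a pattern never increases the ',' count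
theorem pv_go_count_le (old : List Char) (hne : old ≠ []) :
    ∀ (fuel : Nat) (l acc : List Char), l.length ≤ fuel →
    (PySem.Chars.replace.go old [] fuel l acc).count ',' ≤ acc.count ',' + l.count ',' := by
  intro fuel
  induction fuel with
  | zero =>
    intro l acc h
    have : l = [] := List.eq_nil_of_length_eq_zero (Nat.le_zero.mp h)
    subst this
    simp [PySem.Chars.replace.go]
  | succ n ih =>
    intro l acc h
    cases l with
    | nil => simp [PySem.Chars.replace.go]
    | cons c t =>
      rw [pv_go_cons]
      by_cases hp : old.isPrefixOf (c::t)
      · rw [if_pos hp]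
        obtain ⟨l', hl'⟩ := (List.isPrefixOf_iff_prefix.mp hp)
        have hdrop : List.drop old.length (c::t) = l' := by
          rw [← hl', List.drop_left]
        have hlen : l'.length ≤ n := by
          have := congrArg List.length hl'
          simp at this
          have hop : 1 ≤ old.length := List.length_pos_of_ne_nil hne
          simp at h
          omega
        have := ih l' acc (by omega)
        rw [hdrop]
        simp only [List.reverse_nil, List.nil_append]
        have hcount : l'.count ',' ≤ (c::t).count ',' := by
          rw [← hl', List.count_append]; omega
        omega
      · rw [if_neg hp]
        have := ih t (c::acc) (by simpa using h)
        calc (PySem.Chars.replace.go old [] n t (c::acc)).count ','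
            ≤ (c::acc).count ',' + t.count ',' := this
          _ ≤ acc.count ',' + (c::t).count ',' := by
              simp [List.count_cons]; omega

-- deleting occurrences of a comma-free pattern preserves the ',' count exactly
theorem pv_go_count_eq (old : List Char) (hne : old ≠ []) (hnc : ',' ∉ old) :
    ∀ (fuel : Nat) (l acc : List Char), l.length ≤ fuel →
    (PySem.Chars.replace.go old [] fuel l acc).count ',' = acc.count ',' + l.count ',' := by
  intro fuel
  induction fuel with
  | zero =>
    intro l acc h
    have : l = [] := List.eq_nil_of_length_eq_zero (Nat.le_zero.mp h)
    subst this
    simp [PySem.Chars.replace.go]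
  | succ n ih =>
    intro l acc h
    cases l with
    | nil => simp [PySem.Chars.replace.go]
    | cons c t =>
      rw [pv_go_cons]
      by_cases hp : old.isPrefixOf (c::t)
      · rw [if_pos hp]
        obtain ⟨l', hl'⟩ := (List.isPrefixOf_iff_prefix.mp hp)
        have hdrop : List.drop old.length (c::t) = l' := by
          rw [← hl', List.drop_left]
        have hlen : l'.length ≤ n := by
          have := congrArg List.length hl'
          simp at this
          have hop : 1 ≤ old.length := List.length_pos_of_ne_nil hne
          simp at h
          omega
        have hold0 : old.count ',' = 0 := List.count_eq_zero.mpr hnc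
        have hcount : (c::t).count ',' = l'.count ',' := by
          rw [← hl', List.count_append, hold0, Nat.zero_add]
        rw [hdrop]
        simp only [List.reverse_nil, List.nil_append]
        rw [ih l' acc (by omega), hcount]
      · rw [if_neg hp]
        rw [ih t (c::acc) (by simpa using h)]
        simp [List.count_cons]
        omega

theorem pv_replace_count_preserve (s old : List Char) (hne : old ≠ []) (hnc : ',' ∉ old) :
    (PySem.Chars.replace s old []).count ',' = s.count ',' := by
  rw [PySem.Chars.replace, if_neg (by simpa using hne)]
  simpa using pv_go_count_eq old hne hnc s.length s [] le_rfl

theorem pv_replace_count_lt (s old rest : List Char) (hs : s = old ++ rest)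
    (hc : 1 ≤ old.count ',') :
    (PySem.Chars.replace s old []).count ',' < s.count ',' := by
  have hne : old ≠ [] := by
    intro h0; rw [h0] at hc; simp at hc
  rw [PySem.Chars.replace, if_neg (by simpa using hne)]
  obtain ⟨c, t, hct⟩ : ∃ c t, s = c :: t := by
    cases hcs : s with
    | nil =>
      exfalso
      cases old with
      | nil => exact hne rfl
      | cons a b => rw [hcs] at hs; simp at hs
    | cons c t => exact ⟨c, t, rfl⟩
  rw [hct]
  rw [hct] at hs
  have hp : old.isPrefixOf (c::t) := List.isPrefixOf_iff_prefix.mpr ⟨rest, hs.symm⟩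
  rw [List.length_cons, pv_go_cons, if_pos hp]
  have hdrop : List.drop old.length (c::t) = rest := by
    rw [hs, List.drop_left]
  have hlr : rest.length ≤ t.length := by
    have := congrArg List.length hs
    have hop : 1 ≤ old.length := List.length_pos_of_ne_nil hne
    simp at this
    omega
  rw [hdrop]
  simp only [List.reverse_nil, List.nil_append]
  have hle := pv_go_count_le old hne t.length rest [] hlr
  have hcnt : (c::t).count ',' = old.count ',' + rest.count ',' := by
    rw [hs, List.count_append]
  simp only [List.count_nil] at hle
  omega

-- joining the chunks with '/' restores the input
theorem pv_join_split (l : List Char) : ∀ cur, List.intercalate ['/'] (pvSplit l cur) = cur.reverse ++ l := by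
  induction l with
  | nil => intro cur; simp [pvSplit, List.intercalate]
  | cons c t ih =>
    intro cur
    by_cases hc : c = '/'
    · subst hc
      rw [show pvSplit ('/'::t) cur = cur.reverse :: pvSplit t [] from by simp [pvSplit]]
      rw [pv_intercalate_cons _ _ (pv_split_nonempty t []), ih []]
      simp
    · rw [show pvSplit (c::t) cur = pvSplit t (c::cur) from by simp [pvSplit, hc]]
      rw [ih (c::cur)]
      simp

-- chunks contain no '/'
theorem pv_split_noslash (l : List Char) : ∀ cur, ('/' ∉ cur) →
    ∀ seg ∈ pvSplit l cur, '/' ∉ seg := by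
  induction l with
  | nil =>
    intro cur hcur seg hseg
    rw [pvSplit] at hseg
    simp at hseg
    subst hseg
    simpa using hcur
  | cons c t ih =>
    intro cur hcur seg hseg
    by_cases hc : c = '/'
    · subst hc
      rw [show pvSplit ('/'::t) cur = cur.reverse :: pvSplit t [] from by simp [pvSplit]] at hseg
      rcases List.mem_cons.mp hseg with rfl | hseg'
      · simpa using hcur
      · exact ih [] (by simp) seg hseg'
    · rw [show pvSplit (c::t) cur = pvSplit t (c::cur) from by simp [pvSplit, hc]] at hseg
      exact ih (c::cur) (by simp [hcur, Ne.symm hc, hc]) seg hseg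

theorem pv_intercalate_append2 (as : List (List Char)) (xs ys : List Char) (h : as ≠ []) :
    List.intercalate ['/'] (as ++ [xs, ys])
      = List.intercalate ['/'] as ++ '/' :: (xs ++ '/' :: ys) := by
  induction as with
  | nil => exact absurd rfl h
  | cons a t ih =>
    cases t with
    | nil => simp [List.intercalate]
    | cons b t' =>
      rw [List.cons_append, pv_intercalate_cons _ _ (by simp),
        pv_intercalate_cons _ _ (by simp), ih (by simp)]
      simp

-- items of overwriting the same key in the same dict determine the written value
theorem pv_insert_items_inj (d : List (String × String)) (vA vB : String)
    (h : (PySem.Dict.insert (PySem.Dict.mk d) "name" vA).items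
        = (PySem.Dict.insert (PySem.Dict.mk d) "name" vB).items) : vA = vB := by
  have hd := PySem.Dict.ext h
  have := congrArg (fun dd => PySem.Dict.get? dd "name") hd
  simpa [PySem.Dict.get?_insert_self] using this

theorem drop_dir_info_tight : Claim_exact_drop_dir_info := by
  intro l hDom hPre hD heq
  obtain ⟨x, t, rfl⟩ := List.exists_cons_of_ne_nil hPre.1
  obtain ⟨m', h1, h2, h3⟩ := pv_sel_go (fun d => pvSlashes d) t x
  have hmin? : PySem.List.min? (x :: t) (fun d => pvSlashes d) = some m' := by
    simpa [PySem.List.min?] using h1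
  have hlayer : (PySem.List.min? ((x :: t).map (fun d => pvSlashes d)) (fun y => y)).getD 0 = pvSlashes m' := by
    rw [List.map_cons, PySem.List.min?_id_cons]; simpa using h2.symm
  have hhead : ((x :: t).filter (fun d => pvSlashes d == pvSlashes m')).headD [] = m' := by
    rw [List.headD_eq_head?_getD, h3]; rfl
  have hsortedHead : ((PySem.List.sorted (x :: t) (fun d => pvSlashes d) false).headD []) = m' := by
    rw [List.headD_eq_head?_getD, pv_head_sorted, hmin?]; rfl
  have hkeys : (fun d => (pvKey d).count '/') = fun d : List (String × String) => pvSlashes d :=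
    funext fun d => (pv_slashes_eq d).symm
  have hdeep : 2 ≤ (((pvNameOf m').toList.dropWhile (· != ',')).count '/') := by
    unfold D_drop_dir_info at hD
    rw [pv_argmin_eq, hkeys, hmin?, Option.getD_some, pv_key_eq] at hD
    exact hD
  -- both outputs as maps over the input
  simp only [drop_dir_info, drop_dir_info_alt] at heq
  rw [hlayer, hhead, hsortedHead, PySem.List.foldl_append_singleton_eq_map, List.nil_append] at heq
  have hm'mem : m' ∈ x :: t := PySem.List.min?_mem hmin?
  have hfa := List.map_inj_left.mp heq m' hm'mem
  have hv := pv_insert_items_inj m' _ _ hfa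
  -- name both prefixes concretely
  have hsplit : (PySem.Str.split? (pvNameOf m') "/").getD []
      = (pvSplit (pvNameOf m').toList []).map String.ofList := by
    rw [PySem.Str.split?, PySem.Chars.split?]
    rw [if_neg (by simp)]
    rw [(by rfl : ("/").toList = ['/']), pv_splitOn_eq]
    rfl
  set sL := (pvNameOf m').toList with hsL
  set chunks := pvSplit sL [] with hch
  set dropC := chunks.take (chunks.length - 2) with hdC
  have hsegsS : PySem.List.slice ((PySem.Str.split? (pvNameOf m') "/").getD []) none (some (-2))
      = dropC.map String.ofList := by
    rw [hsplit, pv_slice_neg2, List.length_map, ← List.map_take]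
  have hmtl : (dropC.map String.ofList).map String.toList = dropC := by
    rw [List.map_map]
    exact List.map_congr_left (fun a _ => String.toList_ofList) |>.trans (List.map_id _)
  -- toList of A's prefix: map-comma-to-slash of the ','-join, plus a final '/'
  have hpA : (PySem.Str.join "" [PySem.Str.replace
        (PySem.Str.join "," (PySem.List.slice ((PySem.Str.split? (pvNameOf m') "/").getD []) none (some (-2)))) "," "/", "/"]).toList
      = (List.intercalate [','] dropC).map (fun c => if c = ',' then '/' else c) ++ ['/'] := by
    rw [hsegsS]
    rw [PySem.Str.join, PySem.Str.replace, PySem.Str.join]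
    simp only [String.toList_ofList, PySem.Chars.join]
    rw [(by rfl : (",").toList = [',']), (by rfl : ("/").toList = ['/'])]
    rw [PySem.Chars.replace, if_neg (by simp)]
    rw [pv_replace_go _ _ _ le_rfl]
    rw [hmtl]
    simp [List.intercalate]
  -- toList of B's prefix: the '/'-join plus a final '/'
  have hpB : (String.ofList (if (sL.foldl pvStep ([], [], [])).1 = []
        then ['/'] else (sL.foldl pvStep ([], [], [])).1)).toList
      = List.intercalate ['/'] dropC ++ ['/'] := by
    rw [String.toList_ofList, pv_B_prefix sL, ← hch]
  -- structure of the selected name around its dropped prefix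
  have hlen : chunks.length = sL.count '/' + 1 := pv_split_length sL []
  have hslash2 : 2 ≤ sL.count '/' :=
    le_trans hdeep ((List.dropWhile_sublist _).count_le '/')
  have hdl : (chunks.drop (chunks.length - 2)).length = 2 := by
    rw [List.length_drop]; omega
  obtain ⟨xs, ys, hxy⟩ := List.length_eq_two.mp hdl
  have hdcne : dropC ≠ [] := by
    intro h0
    have := congrArg List.length h0
    rw [hdC, List.length_take] at this
    simp at this
    omega
  have hchunks : dropC ++ [xs, ys] = chunks := by
    rw [hdC, ← hxy]
    exact List.take_append_drop _ _
  have hxs : '/' ∉ xs := by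
    apply pv_split_noslash sL [] (by simp)
    rw [← hch, ← hchunks]
    simp
  have hys : '/' ∉ ys := by
    apply pv_split_noslash sL [] (by simp)
    rw [← hch, ← hchunks]
    simp
  have hsdecomp : sL = (List.intercalate ['/'] dropC ++ ['/']) ++ (xs ++ '/' :: ys) := by
    have := pv_join_split sL []
    rw [← hch] at this
    rw [← hchunks, pv_intercalate_append2 _ _ _ hdcne] at this
    simpa using this.symm
  -- B's prefix contains a comma (this is exactly D_)
  have hcomma : 1 ≤ (List.intercalate ['/'] dropC ++ ['/']).count ',' := by
    by_contra h0
    push_neg at h0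
    have hz : (List.intercalate ['/'] dropC ++ ['/']).count ',' = 0 := by omega
    have hnm : ∀ a ∈ (List.intercalate ['/'] dropC ++ ['/']), (a != ',') = true := by
      intro a ha
      have : a ≠ ',' := by
        intro rfl'
        subst rfl'
        exact absurd (List.count_pos_iff.mpr ha) (by omega)
      simpa using this
    have hdw : sL.dropWhile (· != ',') = (xs ++ '/' :: ys).dropWhile (· != ',') := by
      rw [hsdecomp, List.dropWhile_append, if_pos]
      simp [List.dropWhile_eq_nil_iff.mpr hnm]
    have hrest : ((xs ++ '/' :: ys).dropWhile (· != ',')).count '/' ≤ (xs ++ '/' :: ys).count '/' :=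
      (List.dropWhile_sublist _).count_le '/'
    have hrcnt : (xs ++ '/' :: ys).count '/' = 1 := by
      rw [List.count_append, List.count_cons]
      simp [List.count_eq_zero.mpr hxs, List.count_eq_zero.mpr hys]
    rw [hdw] at hdeep
    omega
  -- A's prefix is comma-free
  have hnope : ',' ∉ (List.intercalate [','] dropC).map (fun c => if c = ',' then '/' else c) ++ ['/'] := by
    intro hmem
    rcases List.mem_append.mp hmem with hm | hm
    · obtain ⟨c, _, hc⟩ := List.mem_map.mp hm
      by_cases h' : c = ',' <;> simp [h'] at hc
    · simp at hm
  -- compare comma counts of the two written names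
  have hvl := congrArg String.toList hv
  rw [PySem.Str.toList_replace, PySem.Str.toList_replace] at hvl
  rw [hpA, hpB] at hvl
  have hae : ((PySem.Chars.replace sL ((List.intercalate [','] dropC).map (fun c => if c = ',' then '/' else c) ++ ['/']) ("").toList)).count ','
      = sL.count ',' := by
    rw [(by rfl : ("").toList = ([] : List Char))]
    exact pv_replace_count_preserve _ _ (by simp) hnope
  have hbl : ((PySem.Chars.replace sL (List.intercalate ['/'] dropC ++ ['/']) ("").toList)).count ','
      < sL.count ',' := by
    rw [(by rfl : ("").toList = ([] : List Char))]
    exact pv_replace_count_lt _ _ _ hsdecomp hcomma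
  rw [hvl] at hae
  rw [hae] at hbl
  exact Nat.lt_irrefl _ hbl
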